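-- pv_equiv track=rewrite | github.com/AndreBFarias/protocolo-ouroboros | src/dashboard/paginas/be_ciclo.py | _strip_mensal_html
-- ===== SOURCE A (Python) =====
-- from typing import Any
--
-- TOTAL_DIAS_CICLO = 28
--
-- FASES_JANELAS: list[dict[str, Any]] = [
--     {"k": "menstrual", "ini": 1, "fim": 5, "cor": "#ff5555",
--      "nome": "menstrual", "janela": "d 1-5",
--      "nota": "fluxo · descanso · cuidados"},
--     {"k": "folicular", "ini": 6, "fim": 13, "cor": "#f1fa8c",
--      "nome": "folicular", "janela": "d 6-13",
--      "nota": "energia ↑ · foco ↑ · social"},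
--     {"k": "fertil", "ini": 14, "fim": 16, "cor": "#bd93f9",
--      "nome": "fértil", "janela": "d 14-16",
--      "nota": "libido pico · ovulação"},
--     {"k": "lutea", "ini": 17, "fim": 28, "cor": "#ff79c6",
--      "nome": "lútea", "janela": "d 17-28",
--      "nota": "TPM possível · sensibilidade ↑"},
-- ]
--
-- def _fase_do_dia(dia: int) -> dict[str, Any]:
--     """Devolve o dicionário de fase para o dia ``d`` (1..28)."""
--     for fase in FASES_JANELAS:
--         if fase["ini"] <= dia <= fase["fim"]:
--             return fase
--     return FASES_JANELAS[-1]
--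
-- def _strip_mensal_html(dia_atual: int) -> str:
--     """Strip linear de 28 dias com o dia atual destacado."""
--     celulas: list[str] = []
--     mapa_classes = {
--         "menstrual": "menstr",
--         "folicular": "fol",
--         "fertil": "fert",
--         "lutea": "lut",
--     }
--     for d in range(1, TOTAL_DIAS_CICLO + 1):
--         fase = _fase_do_dia(d)
--         classe = mapa_classes.get(fase["k"], "")
--         marca = " hoje" if d == dia_atual else ""
--         celulas.append(f'<div class="d {classe}{marca}">{d}</div>')
--     legenda = (
--         '<div class="legenda-strip">'
--         '<span class="menstr">menstrual</span>'
--         '<span class="fol">folicular</span>'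
--         '<span class="fert">fertil</span>'
--         '<span class="lut">lutea</span>'
--         '<span style="margin-left:auto;color:var(--accent-cyan);">hoje</span>'
--         '</div>'
--     )
--     return (
--         '<div class="ciclo-card">'
--         '<h3 style="font-family:var(--ff-mono);font-size:11px;'
--         'letter-spacing:0.10em;text-transform:uppercase;'
--         'color:var(--text-muted);margin:0 0 var(--sp-3);">'
--         'Strip do mês</h3>'
--         f'<div class="mes-strip">{"".join(celulas)}</div>'
--         f'{legenda}'
--         '</div>'
--     )
-- ===== SOURCE B (Python) =====
-- from typing import Any
--
-- TOTAL_DIAS_CICLO = 28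
--
-- FASES_JANELAS: list[dict[str, Any]] = [
--     {"k": "menstrual", "ini": 1, "fim": 5, "cor": "#ff5555",
--      "nome": "menstrual", "janela": "d 1-5",
--      "nota": "fluxo · descanso · cuidados"},
--     {"k": "folicular", "ini": 6, "fim": 13, "cor": "#f1fa8c",
--      "nome": "folicular", "janela": "d 6-13",
--      "nota": "energia ↑ · foco ↑ · social"},
--     {"k": "fertil", "ini": 14, "fim": 16, "cor": "#bd93f9",
--      "nome": "fértil", "janela": "d 14-16",
--      "nota": "libido pico · ovulação"},
--     {"k": "lutea", "ini": 17, "fim": 28, "cor": "#ff79c6",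
--      "nome": "lútea", "janela": "d 17-28",
--      "nota": "TPM possível · sensibilidade ↑"},
-- ]
--
-- def _strip_mensal_html(dia_atual: int) -> str:
--     """Strip linear de 28 dias com o dia atual destacado.
--
--     Emite as células fase a fase (as janelas cobrem 1..28 em ordem),
--     dispensando a varredura por dia de _fase_do_dia."""
--     mapa_classes = {
--         "menstrual": "menstr",
--         "folicular": "fol",
--         "fertil": "fert",
--         "lutea": "lut",
--     }
--     celulas: list[str] = []
--     for fase in FASES_JANELAS:
--         classe = mapa_classes.get(fase["k"], "")
--         for d in range(fase["ini"], fase["fim"] + 1):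
--             marca = " hoje" if d == dia_atual else ""
--             celulas.append(f'<div class="d {classe}{marca}">{d}</div>')
--     legenda = (
--         '<div class="legenda-strip">'
--         '<span class="menstr">menstrual</span>'
--         '<span class="fol">folicular</span>'
--         '<span class="fert">fertil</span>'
--         '<span class="lut">lutea</span>'
--         '<span style="margin-left:auto;color:var(--accent-cyan);">hoje</span>'
--         '</div>'
--     )
--     return (
--         '<div class="ciclo-card">'
--         '<h3 style="font-family:var(--ff-mono);font-size:11px;'
--         'letter-spacing:0.10em;text-transform:uppercase;'
--         'color:var(--text-muted);margin:0 0 var(--sp-3);">'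
--         'Strip do mês</h3>'
--         f'<div class="mes-strip">{"".join(celulas)}</div>'
--         f'{legenda}'
--         '</div>'
--     )
-- ===== Notes on version B (the rewrite author's own statement) =====
-- stated objective: alternative
-- what changed: B iterates the four phase windows in order and emits one run of cells per window with that phase's class looked up once, instead of A's per-day loop that rescans FASES_JANELAS via _fase_do_dia for every day of the cycle.
import Mathlib
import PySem

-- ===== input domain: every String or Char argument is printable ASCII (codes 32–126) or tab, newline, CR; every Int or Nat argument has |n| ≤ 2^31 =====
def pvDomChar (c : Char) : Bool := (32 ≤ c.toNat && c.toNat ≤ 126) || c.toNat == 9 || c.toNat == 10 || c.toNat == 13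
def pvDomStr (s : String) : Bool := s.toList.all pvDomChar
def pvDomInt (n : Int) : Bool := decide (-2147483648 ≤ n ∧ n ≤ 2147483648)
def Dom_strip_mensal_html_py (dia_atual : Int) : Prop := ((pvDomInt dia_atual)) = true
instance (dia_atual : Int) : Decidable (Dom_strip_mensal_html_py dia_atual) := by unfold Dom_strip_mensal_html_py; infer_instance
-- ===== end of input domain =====

-- B emits the 28 cells phase window by phase window (one class lookup per phase) instead of
-- A's per-day scan of FASES_JANELAS; equal output, same cost class (objective: alternative).

-- ===== PORT A =====
-- FASES_JANELAS: only the fields the code reads ("k", "ini", "fim"); the other dict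
-- entries (cor/nome/janela/nota) are never used by _fase_do_dia or _strip_mensal_html.
def pvFasesJanelas : List (String × Int × Int) :=
  [("menstrual", 1, 5), ("folicular", 6, 13), ("fertil", 14, 16), ("lutea", 17, 28)]

def pvTotalDiasCiclo : Int := 28

def pvMapaClasses : PySem.Dict String String :=
  PySem.Dict.ofList [("menstrual", "menstr"), ("folicular", "fol"), ("fertil", "fert"), ("lutea", "lut")]

-- _fase_do_dia: first phase whose window contains dia; FASES_JANELAS[-1] as fallback
def pvFaseDoDia (dia : Int) : String × Int × Int :=
  (pvFasesJanelas.find? (fun fase => decide (fase.2.1 ≤ dia) && decide (dia ≤ fase.2.2))).getD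
    ("lutea", 17, 28)

def pvLegenda : String :=
  "<div class=\"legenda-strip\"><span class=\"menstr\">menstrual</span><span class=\"fol\">folicular</span><span class=\"fert\">fertil</span><span class=\"lut\">lutea</span><span style=\"margin-left:auto;color:var(--accent-cyan);\">hoje</span></div>"

def pvHeader : String :=
  "<div class=\"ciclo-card\"><h3 style=\"font-family:var(--ff-mono);font-size:11px;letter-spacing:0.10em;text-transform:uppercase;color:var(--text-muted);margin:0 0 var(--sp-3);\">Strip do mês</h3><div class=\"mes-strip\">"

def strip_mensal_html_py (dia_atual : Int) : String :=
  let celulas : List String :=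
    (PySem.List.pyRange 1 (pvTotalDiasCiclo + 1) 1).foldl
      (fun acc d =>
        let fase := pvFaseDoDia d
        let classe := PySem.Dict.getD pvMapaClasses fase.1 ""
        let marca := if d == dia_atual then " hoje" else ""
        acc ++ [PySem.Str.join "" ["<div class=\"d ", classe, marca, "\">", PySem.Int.toStr d, "</div>"]])
      []
  PySem.Str.join "" [pvHeader, PySem.Str.join "" celulas, "</div>", pvLegenda, "</div>"]

-- ===== PORT B =====
def strip_mensal_html_py_alt (dia_atual : Int) : String :=
  let celulas : List String :=
    pvFasesJanelas.foldl
      (fun acc fase =>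
        let classe := PySem.Dict.getD pvMapaClasses fase.1 ""
        (PySem.List.pyRange fase.2.1 (fase.2.2 + 1) 1).foldl
          (fun acc2 d =>
            let marca := if d == dia_atual then " hoje" else ""
            acc2 ++ [PySem.Str.join "" ["<div class=\"d ", classe, marca, "\">", PySem.Int.toStr d, "</div>"]])
          acc)
      []
  PySem.Str.join "" [pvHeader, PySem.Str.join "" celulas, "</div>", pvLegenda, "</div>"]

-- ===== PRECONDITION & SPEC =====
-- ===== PRECONDITION & SPEC =====
def Spec_strip_mensal_html_py (dia_atual : Int) (out : String) : Prop := out = strip_mensal_html_py_alt dia_atual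
instance (dia_atual : Int) (out : String) : Decidable (Spec_strip_mensal_html_py dia_atual out) := by unfold Spec_strip_mensal_html_py; infer_instance

-- ===== CLAIM (what is proved, stated in full; the proofs are below) =====
def Claim_equal_strip_mensal_html_py : Prop := ∀ (dia_atual : Int), Dom_strip_mensal_html_py dia_atual → Spec_strip_mensal_html_py dia_atual (strip_mensal_html_py dia_atual)

-- ===== LEMMAS AND PROOFS =====

-- _fase_do_dia's scan resolved on each of the four windows
theorem fase_window_1 : ∀ x : Int, 1 ≤ x → x < 5 + 1 → (pvFaseDoDia x).1 = "menstrual" := by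
  intro x h1 h2
  unfold pvFaseDoDia pvFasesJanelas
  rw [List.find?_cons_of_pos (by simp; omega)]
  rfl

theorem fase_window_2 : ∀ x : Int, 6 ≤ x → x < 13 + 1 → (pvFaseDoDia x).1 = "folicular" := by
  intro x h1 h2
  unfold pvFaseDoDia pvFasesJanelas
  rw [List.find?_cons_of_neg (by simp; omega), List.find?_cons_of_pos (by simp; omega)]
  rfl

theorem fase_window_3 : ∀ x : Int, 14 ≤ x → x < 16 + 1 → (pvFaseDoDia x).1 = "fertil" := by
  intro x h1 h2
  unfold pvFaseDoDia pvFasesJanelas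
  rw [List.find?_cons_of_neg (by simp; omega), List.find?_cons_of_neg (by simp; omega),
    List.find?_cons_of_pos (by simp; omega)]
  rfl

theorem fase_window_4 : ∀ x : Int, 17 ≤ x → x < 28 + 1 → (pvFaseDoDia x).1 = "lutea" := by
  intro x h1 h2
  unfold pvFaseDoDia pvFasesJanelas
  rw [List.find?_cons_of_neg (by simp; omega), List.find?_cons_of_neg (by simp; omega),
    List.find?_cons_of_neg (by simp; omega), List.find?_cons_of_pos (by simp; omega)]
  rfl

-- on a window where _fase_do_dia is constantly `key`, A's per-day cell loop IS B's per-window cell loop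
theorem seg_congr (dia a b : Int) (key : String)
    (hf : ∀ x : Int, a ≤ x → x < b → (pvFaseDoDia x).1 = key) (init : List String) :
    List.foldl (fun acc d => acc ++ [PySem.Str.join "" ["<div class=\"d ",
        pvMapaClasses.getD (pvFaseDoDia d).1 "", if d == dia then " hoje" else "", "\">",
        PySem.Int.toStr d, "</div>"]]) init (PySem.List.pyRange a b 1)
    = List.foldl (fun acc2 d => acc2 ++ [PySem.Str.join "" ["<div class=\"d ",
        pvMapaClasses.getD key "", if d == dia then " hoje" else "", "\">",
        PySem.Int.toStr d, "</div>"]]) init (PySem.List.pyRange a b 1) := by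
  apply PySem.List.foldl_congr_mem
  intro acc x hx
  have hb := (PySem.List.mem_pyRange_one).mp hx
  rw [hf x hb.1 hb.2]

-- ===== VERDICT (by name: the statement is the Claim_ definition above) =====
theorem strip_mensal_html_py_spec : Claim_equal_strip_mensal_html_py := by
  intro dia _
  unfold Spec_strip_mensal_html_py
  simp only [strip_mensal_html_py, strip_mensal_html_py_alt, pvFasesJanelas, pvTotalDiasCiclo,
    List.foldl_cons, List.foldl_nil]
  rw [show PySem.List.pyRange 1 (28+1) 1
      = PySem.List.pyRange 1 (5+1) 1 ++ (PySem.List.pyRange 6 (13+1) 1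
        ++ (PySem.List.pyRange 14 (16+1) 1 ++ PySem.List.pyRange 17 (28+1) 1)) from by decide]
  rw [List.foldl_append, List.foldl_append, List.foldl_append]
  rw [seg_congr dia 1 (5+1) "menstrual" fase_window_1]
  rw [seg_congr dia 6 (13+1) "folicular" fase_window_2]
  rw [seg_congr dia 14 (16+1) "fertil" fase_window_3]
  rw [seg_congr dia 17 (28+1) "lutea" fase_window_4]
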